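-- pv_equiv track=rewrite | github.com/fables-tales/scoring-2014 | lib/score_logic.py | tidy_zones
-- ===== SOURCE A (Python) =====
-- from collections import defaultdict
--
-- def tidy_zones(zone_map):
--     token_map = defaultdict(lambda: defaultdict(set))
--     tidied = {}
--
--     for tla, zones in zone_map.items():
--         for z, val in zones.items():
--             if val > 0:
--                 token_map[z][val].add(tla)
--
--         tidied[tla] = set()
--
--     owners = {}
--     for z, claims in token_map.items():
--         max_tokens = max(claims.keys())
--         top_teams = claims[max_tokens]
--         if len(top_teams) == 1:
--             owners[z] = top_teams.pop()
--
--     for slot, owner in owners.items():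
--         tidied[owner].add(slot)
--
--     return tidied
-- ===== SOURCE B (Python) =====
-- def tidy_zones(zone_map):
--     # one pass keeping, per zone, only (max value seen, #teams at that value, team that set the max)
--     best = {}
--     for tla, zones in zone_map.items():
--         for z, val in zones.items():
--             if val > 0:
--                 rec = best.get(z)
--                 if rec is None or val > rec[0]:
--                     best[z] = [val, 1, tla]
--                 elif val == rec[0]:
--                     rec[1] += 1
--     tidied = {tla: set() for tla in zone_map}
--     for z, rec in best.items():
--         if rec[1] == 1:
--             tidied[rec[2]].add(z)
--     return tidied
-- ===== Notes on version B (the rewrite author's own statement) =====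
-- stated objective: simpler
-- what changed: Replaces the nested defaultdict of value->set-of-teams plus the separate max-scan/owners passes by a single per-zone running record (max value, count of teams at it, team that set it) updated in one pass.
import Mathlib
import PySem

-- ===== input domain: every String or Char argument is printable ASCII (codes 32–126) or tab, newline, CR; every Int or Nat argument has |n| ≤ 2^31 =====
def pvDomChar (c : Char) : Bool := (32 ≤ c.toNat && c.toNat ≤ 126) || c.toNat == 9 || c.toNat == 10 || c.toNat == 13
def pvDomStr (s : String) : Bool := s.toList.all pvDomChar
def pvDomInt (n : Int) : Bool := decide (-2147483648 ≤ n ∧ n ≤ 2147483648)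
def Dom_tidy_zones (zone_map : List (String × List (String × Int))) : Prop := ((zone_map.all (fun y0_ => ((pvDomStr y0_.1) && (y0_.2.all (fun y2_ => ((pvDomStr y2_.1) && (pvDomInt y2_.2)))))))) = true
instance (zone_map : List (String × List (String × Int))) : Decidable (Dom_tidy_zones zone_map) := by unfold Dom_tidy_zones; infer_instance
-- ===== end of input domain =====

-- B replaces A's nested value->set-of-teams dict and its separate max/owners passes by one per-zone
-- running record (max value, team count at it, team that set it); equivalence is on the return value
-- (A also mutates its internal sets via pop(), which is not observable in the result).
-- Both Pythons receive dicts; the assoc-list arguments are read with dict semantics (Dict.ofList).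

-- B replaces A's nested value->set-of-teams dict and its separate max/owners passes by one per-zone
-- running record (max value, team count at it, team that set it); equivalence is on the return value.
-- Both Pythons receive dicts; the assoc-list arguments are read with dict semantics (Dict.ofList).

-- ===== PORT A =====
-- token_map[z][val].add(tla) for one inner item zv = (z, val)
def stepA (tla : String) (tm : PySem.Dict String (PySem.Dict Int (PySem.Set String)))
    (zv : String × Int) : PySem.Dict String (PySem.Dict Int (PySem.Set String)) :=
  if zv.2 > 0 then
    tm.modify zv.1 PySem.Dict.empty (fun d => d.modify zv.2 PySem.Set.empty (fun s => PySem.Set.add s tla))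
  else tm

def tidy_zones (zone_map : List (String × List (String × Int))) : List (String × List String) :=
  -- the Python receives dicts; the assoc-list inputs are read with dict semantics (ofList)
  let zm : PySem.Dict String (PySem.Dict String Int) :=
    PySem.Dict.ofList (zone_map.map (fun p => (p.1, PySem.Dict.ofList p.2)))
  let st :=
    zm.items.foldl
      (fun (st : PySem.Dict String (PySem.Dict Int (PySem.Set String)) × PySem.Dict String (PySem.Set String)) tz =>
        (tz.2.items.foldl (stepA tz.1) st.1, st.2.insert tz.1 PySem.Set.empty))
      (PySem.Dict.empty, PySem.Dict.empty)
  let owners : PySem.Dict String String :=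
    st.1.items.foldl
      (fun ow zc =>
        match PySem.List.max? zc.2.keys (fun x => x) with
        | none => ow  -- unreachable: claims dicts are never empty
        | some mx =>
          let top := zc.2.getD mx PySem.Set.empty
          if top.length = 1 then ow.insert zc.1 (top.headD "") else ow)
      PySem.Dict.empty
  (owners.items.foldl
    (fun td so => td.modify so.2 PySem.Set.empty (fun s => PySem.Set.add s so.1)) st.2).items

-- ===== PORT B =====
-- one inner item zv = (z, val) updating the running record best[z] = (max, count, owner)
def stepB (tla : String) (b : PySem.Dict String (Int × Int × String))
    (zv : String × Int) : PySem.Dict String (Int × Int × String) :=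
  if zv.2 > 0 then
    match b.get? zv.1 with
    | none => b.insert zv.1 (zv.2, 1, tla)
    | some r =>
      if zv.2 > r.1 then b.insert zv.1 (zv.2, 1, tla)
      else if zv.2 = r.1 then b.insert zv.1 (r.1, r.2.1 + 1, r.2.2)
      else b
  else b

def tidy_zones_alt (zone_map : List (String × List (String × Int))) : List (String × List String) :=
  let zm : PySem.Dict String (PySem.Dict String Int) :=
    PySem.Dict.ofList (zone_map.map (fun p => (p.1, PySem.Dict.ofList p.2)))
  let best : PySem.Dict String (Int × Int × String) :=
    zm.items.foldl (fun b tz => tz.2.items.foldl (stepB tz.1) b) PySem.Dict.empty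
  let tidied0 : PySem.Dict String (PySem.Set String) :=
    zm.items.foldl (fun td tz => td.insert tz.1 PySem.Set.empty) PySem.Dict.empty
  (best.items.foldl
    (fun td zr => if zr.2.2.1 = 1 then td.modify zr.2.2.2 PySem.Set.empty (fun s => PySem.Set.add s zr.1) else td)
    tidied0).items

-- ===== PRECONDITION & SPEC =====
def Spec_tidy_zones (zone_map : List (String × List (String × Int))) (out : List (String × List String)) : Prop := out = tidy_zones_alt zone_map
instance (zone_map : List (String × List (String × Int))) (out : List (String × List String)) : Decidable (Spec_tidy_zones zone_map out) := by unfold Spec_tidy_zones; infer_instance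

-- ===== CLAIM (what is proved, stated in full; the proofs are below) =====
def Claim_equal_tidy_zones : Prop := ∀ (zone_map : List (String × List (String × Int))), Dom_tidy_zones zone_map → Spec_tidy_zones zone_map (tidy_zones zone_map)

-- ===== LEMMAS AND PROOFS =====

def WfTM (tm : PySem.Dict String (PySem.Dict Int (PySem.Set String))) : Prop :=
  tm.keys.Nodup ∧ ∀ p ∈ tm.items, p.2.keys.Nodup ∧ p.2.items ≠ [] ∧ ∀ q ∈ p.2.items, q.2 ≠ []

def TeamsIn (tm : PySem.Dict String (PySem.Dict Int (PySem.Set String))) (S : List String) : Prop :=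
  ∀ p ∈ tm.items, ∀ q ∈ p.2.items, ∀ t ∈ q.2, t ∈ S

def FreshAt (tm : PySem.Dict String (PySem.Dict Int (PySem.Set String))) (tla z : String) : Prop :=
  ∀ v : Int, tla ∉ (tm.getD z PySem.Dict.empty).getD v ([] : PySem.Set String)

theorem set_add_ne_nil {α : Type} [BEq α] (s : PySem.Set α) (x : α) : PySem.Set.add s x ≠ [] := by
  unfold PySem.Set.add
  split
  · rename_i h
    intro hnil
    subst hnil
    simp [PySem.Set.contains] at h
  · simp

theorem insert_items_ne_nil {κ ν : Type} [BEq κ] (d : PySem.Dict κ ν) (k : κ) (v : ν) :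
    (d.insert k v).items ≠ [] := by
  by_cases h : d.contains k = true
  · rw [PySem.Dict.items_insert_of_contains d v h]
    intro hnil
    simp at hnil
    have : d.contains k = false := by
      cases d with | mk l => simp at hnil; simp [hnil, PySem.Dict.contains]
    rw [this] at h; cases h
  · rw [PySem.Dict.items_insert_of_not_contains d v (by simpa using h)]
    simp

theorem get?_of_contains {κ ν : Type} [BEq κ] [LawfulBEq κ] (d : PySem.Dict κ ν) (k : κ)
    (h : d.contains k = true) : ∃ c, d.get? k = some c ∧ ∀ d0, d.getD k d0 = c := by
  cases hg : d.get? k with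
  | none => rw [PySem.Dict.get?_eq_none_iff_contains] at hg; rw [h] at hg; cases hg
  | some c => exact ⟨c, rfl, fun d0 => by rw [PySem.Dict.getD_eq_get?_getD, hg]; rfl⟩

theorem step_wf (tla : String) (tm : PySem.Dict String (PySem.Dict Int (PySem.Set String)))
    (zv : String × Int) (hWf : WfTM tm) : WfTM (stepA tla tm zv) := by
  obtain ⟨hnd, hin⟩ := hWf
  unfold stepA
  split
  · simp only [PySem.Dict.modify]
    constructor
    · exact PySem.Dict.nodup_keys_insert _ _ _ hnd
    · intro p hp
      rcases (PySem.Dict.mem_items_insert _ _ _ _).mp hp with rfl | ⟨hmem, _⟩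
      · -- the new entry (zv.1, g (tm.getD zv.1 ∅))
        by_cases hc : tm.contains zv.1 = true
        · obtain ⟨c, hg, hgd⟩ := get?_of_contains tm zv.1 hc
          rw [hgd]
          have hc' := hin (zv.1, c) ((PySem.Dict.get?_eq_some_iff_mem_items tm zv.1 c hnd).mp hg)
          refine ⟨PySem.Dict.nodup_keys_insert _ _ _ hc'.1, insert_items_ne_nil _ _ _, ?_⟩
          intro q hq
          rcases (PySem.Dict.mem_items_insert _ _ _ _).mp hq with rfl | ⟨hm2, _⟩
          · exact set_add_ne_nil _ _
          · exact hc'.2.2 q hm2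
        · rw [PySem.Dict.getD_of_not_contains tm _ (by simpa using hc)]
          have hne : (PySem.Dict.empty : PySem.Dict Int (PySem.Set String)).keys.Nodup :=
            PySem.Dict.nodup_keys_empty
          refine ⟨PySem.Dict.nodup_keys_insert _ _ _ hne, insert_items_ne_nil _ _ _, ?_⟩
          intro q hq
          rcases (PySem.Dict.mem_items_insert (PySem.Dict.empty : PySem.Dict Int (PySem.Set String)) zv.2 (PySem.Set.add (PySem.Dict.empty.getD zv.2 PySem.Set.empty) tla) q).mp hq with rfl | ⟨hm2, _⟩
          · exact set_add_ne_nil (PySem.Dict.empty.getD zv.2 PySem.Set.empty) tla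
          · simp [PySem.Dict.empty] at hm2
      · exact hin p hmem
  · exact ⟨hnd, hin⟩

theorem step_teams (tla : String) (tm : PySem.Dict String (PySem.Dict Int (PySem.Set String)))
    (zv : String × Int) (S : List String) (hnd : tm.keys.Nodup) (hT : TeamsIn tm S) (hS : tla ∈ S) :
    TeamsIn (stepA tla tm zv) S := by
  unfold stepA
  split
  · simp only [PySem.Dict.modify]
    intro p hp q hq t ht
    rcases (PySem.Dict.mem_items_insert _ _ _ _).mp hp with rfl | ⟨hmem, _⟩
    · rcases (PySem.Dict.mem_items_insert _ _ _ _).mp hq with rfl | ⟨hm2, _⟩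
      · rcases (PySem.Set.mem_add _ _ _).mp ht with h | rfl
        · -- t was already in the old set at (zv.1, zv.2)
          by_cases hc : tm.contains zv.1 = true
          · obtain ⟨c, hg, hgd⟩ := get?_of_contains tm zv.1 hc
            rw [hgd] at h
            rw [PySem.Dict.getD_eq_get?_getD] at h
            cases hg2 : c.get? zv.2 with
            | none => rw [hg2] at h; simp at h
            | some s =>
              rw [hg2] at h
              exact hT (zv.1, c) ((PySem.Dict.get?_eq_some_iff_mem_items tm zv.1 c hnd).mp hg) (zv.2, s)
                (PySem.Dict.mem_items_of_get?_eq_some c hg2) t h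
          · rw [PySem.Dict.getD_of_not_contains tm _ (by simpa using hc)] at h
            simp [PySem.Dict.getD, PySem.Dict.get?, PySem.Dict.empty] at h
        · exact hS
      · -- q is an untouched entry of the dict at zv.1
        by_cases hc : tm.contains zv.1 = true
        · obtain ⟨c, hg, hgd⟩ := get?_of_contains tm zv.1 hc
          rw [hgd] at hm2
          exact hT (zv.1, c) ((PySem.Dict.get?_eq_some_iff_mem_items tm zv.1 c hnd).mp hg) q hm2 t ht
        · rw [PySem.Dict.getD_of_not_contains tm _ (by simpa using hc)] at hm2
          simp [PySem.Dict.empty] at hm2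
    · exact hT p hmem q hq t ht
  · exact hT

theorem step_fresh (tla t z : String) (tm : PySem.Dict String (PySem.Dict Int (PySem.Set String)))
    (zv : String × Int) (hz : z ≠ zv.1) (hF : FreshAt tm t z) : FreshAt (stepA tla tm zv) t z := by
  unfold stepA
  split
  · simp only [PySem.Dict.modify]
    intro v
    rw [PySem.Dict.getD_insert_of_ne _ _ _ hz]
    exact hF v
  · exact hF

theorem teams_fresh (tm : PySem.Dict String (PySem.Dict Int (PySem.Set String))) (S : List String)
    (tla : String) (hnd : tm.keys.Nodup) (hT : TeamsIn tm S) (h : tla ∉ S) (z : String) :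
    FreshAt tm tla z := by
  intro v hmem
  by_cases hc : tm.contains z = true
  · obtain ⟨c, hg, hgd⟩ := get?_of_contains tm z hc
    rw [hgd] at hmem
    rw [PySem.Dict.getD_eq_get?_getD] at hmem
    cases hg2 : c.get? v with
    | none => rw [hg2] at hmem; simp at hmem
    | some s =>
      rw [hg2] at hmem
      exact h (hT (z, c) ((PySem.Dict.get?_eq_some_iff_mem_items tm z c hnd).mp hg) (v, s)
        (PySem.Dict.mem_items_of_get?_eq_some c hg2) tla hmem)
  · rw [PySem.Dict.getD_of_not_contains tm _ (by simpa using hc)] at hmem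
    simp [PySem.Dict.getD, PySem.Dict.get?, PySem.Dict.empty] at hmem

def absRec (claims : PySem.Dict Int (PySem.Set String)) : Int × Int × String :=
  match PySem.List.max? claims.keys (fun x => x) with
  | none => (0, 0, "")
  | some mx => (mx, ((claims.getD mx ([] : PySem.Set String)).length : Int), (claims.getD mx ([] : PySem.Set String)).headD "")

def RelTB (tm : PySem.Dict String (PySem.Dict Int (PySem.Set String)))
    (b : PySem.Dict String (Int × Int × String)) : Prop :=
  b.items = tm.items.map (fun zc => (zc.1, absRec zc.2))

theorem keys_rel {tm : PySem.Dict String (PySem.Dict Int (PySem.Set String))}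
    {b : PySem.Dict String (Int × Int × String)} (hR : RelTB tm b) : b.keys = tm.keys := by
  unfold RelTB at hR
  simp only [PySem.Dict.keys, hR, List.map_map]
  rfl

theorem contains_rel {tm : PySem.Dict String (PySem.Dict Int (PySem.Set String))}
    {b : PySem.Dict String (Int × Int × String)} (hR : RelTB tm b) (z : String) :
    b.contains z = tm.contains z := by
  rw [PySem.Dict.contains_eq_decide_mem_keys, PySem.Dict.contains_eq_decide_mem_keys, keys_rel hR]

theorem get?_rel {tm : PySem.Dict String (PySem.Dict Int (PySem.Set String))}
    {b : PySem.Dict String (Int × Int × String)} (hR : RelTB tm b) (hnd : tm.keys.Nodup)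
    {z : String} {c : PySem.Dict Int (PySem.Set String)} (hg : tm.get? z = some c) :
    b.get? z = some (absRec c) := by
  have hmem : (z, c) ∈ tm.items := (PySem.Dict.get?_eq_some_iff_mem_items tm z c hnd).mp hg
  have hmem' : (z, absRec c) ∈ b.items := by
    unfold RelTB at hR
    rw [hR]
    exact List.mem_map.mpr ⟨(z, c), hmem, rfl⟩
  exact PySem.Dict.get?_of_mem_items b hmem' (by rw [keys_rel hR]; exact hnd)

theorem set_add_of_not_mem {α : Type} [BEq α] [LawfulBEq α] (s : PySem.Set α) (x : α)
    (h : x ∉ s) : PySem.Set.add s x = s ++ [x] := by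
  unfold PySem.Set.add
  split
  · rename_i hc
    exfalso
    apply h
    simpa [PySem.Set.contains] using hc
  · rfl

theorem headD_append_of_ne_nil {α : Type} (l t : List α) (d : α) (h : l ≠ []) :
    (l ++ t).headD d = l.headD d := by
  cases l with
  | nil => exact absurd rfl h
  | cons a l => rfl

theorem rel_insert {tm : PySem.Dict String (PySem.Dict Int (PySem.Set String))}
    {b : PySem.Dict String (Int × Int × String)} {z : String}
    {c : PySem.Dict Int (PySem.Set String)}
    (hR : RelTB tm b) (hnd : tm.keys.Nodup) (hg : tm.get? z = some c)
    (C : PySem.Dict Int (PySem.Set String)) (w : Int × Int × String) (habs : absRec C = w) :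
    RelTB (tm.insert z C) (b.insert z w) := by
  have hct : tm.contains z = true := by
    rw [PySem.Dict.contains_iff_mem_keys]
    exact PySem.Dict.mem_keys_of_mem_items tm ((PySem.Dict.get?_eq_some_iff_mem_items tm z c hnd).mp hg)
  have hbt : b.contains z = true := by rw [contains_rel hR]; exact hct
  unfold RelTB
  rw [PySem.Dict.items_insert_of_contains b w hbt, PySem.Dict.items_insert_of_contains tm C hct]
  unfold RelTB at hR
  rw [hR, List.map_map, List.map_map]
  apply List.map_congr_left
  intro p hp
  by_cases hpz : p.1 = z
  · have : tm.get? p.1 = some p.2 := PySem.Dict.get?_of_mem_items tm (by cases p; exact hp) hnd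
    rw [hpz, hg] at this
    have hpc : p.2 = c := by injection this with h; exact h.symm
    simp only [Function.comp_apply, hpz, beq_self_eq_true, if_pos, hpc, habs]
  · simp only [Function.comp_apply, beq_iff_eq, hpz, if_false]

theorem rel_untouched {tm : PySem.Dict String (PySem.Dict Int (PySem.Set String))}
    {b : PySem.Dict String (Int × Int × String)} {z : String}
    {c : PySem.Dict Int (PySem.Set String)}
    (hR : RelTB tm b) (hnd : tm.keys.Nodup) (hg : tm.get? z = some c)
    (C : PySem.Dict Int (PySem.Set String)) (habs : absRec C = absRec c) :
    RelTB (tm.insert z C) b := by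
  have hct : tm.contains z = true := by
    rw [PySem.Dict.contains_iff_mem_keys]
    exact PySem.Dict.mem_keys_of_mem_items tm ((PySem.Dict.get?_eq_some_iff_mem_items tm z c hnd).mp hg)
  unfold RelTB
  rw [PySem.Dict.items_insert_of_contains tm C hct]
  unfold RelTB at hR
  rw [hR, List.map_map]
  apply List.map_congr_left
  intro p hp
  by_cases hpz : p.1 = z
  · have : tm.get? p.1 = some p.2 := PySem.Dict.get?_of_mem_items tm (by cases p; exact hp) hnd
    rw [hpz, hg] at this
    have hpc : p.2 = c := by injection this with h; exact h.symm
    simp only [Function.comp_apply, hpz, beq_self_eq_true, if_pos, hpc, habs]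
  · simp only [Function.comp_apply, beq_iff_eq, hpz, if_false]

theorem max?_id_iff (l : List Int) (m : Int) :
    PySem.List.max? l (fun x => x) = some m ↔ m ∈ l ∧ ∀ y ∈ l, y ≤ m := by
  constructor
  · intro h
    exact ⟨PySem.List.max?_mem h, fun y hy => PySem.List.max?_isMax h y hy⟩
  · rintro ⟨hm, hmax⟩
    cases l with
    | nil => simp at hm
    | cons x t =>
      rw [PySem.List.max?_id_cons]
      have h1 := PySem.List.le_foldl_max t x
      have h2 := PySem.List.foldl_max_mem t x
      have hle : t.foldl max x ≤ m := by
        rcases h2 with h | h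
        · rw [h]; exact hmax x (by simp)
        · exact hmax _ (by simp [h])
      have hge : m ≤ t.foldl max x := by
        rcases List.mem_cons.mp hm with rfl | hmem
        · exact h1.1
        · exact h1.2 m hmem
      exact congrArg some (le_antisymm hle hge)

theorem absRec_new (val : Int) (s : PySem.Set String) :
    absRec (PySem.Dict.empty.insert val s) = (val, (s.length : Int), s.headD "") := by
  have hc : (PySem.Dict.empty : PySem.Dict Int (PySem.Set String)).contains val = false :=
    PySem.Dict.contains_empty val
  have hk : (PySem.Dict.empty.insert val s).keys = [val] := by
    rw [PySem.Dict.keys_insert_of_not_contains _ s hc]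
    simp [PySem.Dict.keys_empty]
  have hmax : PySem.List.max? ((PySem.Dict.empty.insert val s).keys) (fun x => x) = some val := by
    rw [hk, PySem.List.max?_id_cons]
    rfl
  unfold absRec
  rw [hmax]
  dsimp only
  rw [PySem.Dict.getD_insert_self]

theorem absRec_gt (c : PySem.Dict Int (PySem.Set String)) (mx val : Int) (s : PySem.Set String)
    (hmax : PySem.List.max? c.keys (fun x => x) = some mx) (hv : mx < val) :
    absRec (c.insert val s) = (val, (s.length : Int), s.headD "") := by
  obtain ⟨hmem, hub⟩ := (max?_id_iff _ _).mp hmax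
  have hnc : c.contains val = false := by
    rw [← Bool.not_eq_true, PySem.Dict.contains_iff_mem_keys]
    intro h
    exact absurd (hub val h) (by omega)
  have hk : (c.insert val s).keys = c.keys ++ [val] :=
    PySem.Dict.keys_insert_of_not_contains c s hnc
  have hmax' : PySem.List.max? ((c.insert val s).keys) (fun x => x) = some val := by
    rw [hk, max?_id_iff]
    constructor
    · simp
    · intro y hy
      rcases List.mem_append.mp hy with h | h
      · exact le_of_lt (lt_of_le_of_lt (hub y h) hv)
      · simp at h; omega
  unfold absRec
  rw [hmax']
  dsimp only
  rw [PySem.Dict.getD_insert_self]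

theorem absRec_eq_add (c : PySem.Dict Int (PySem.Set String)) (mx : Int) (tla : String)
    (hmax : PySem.List.max? c.keys (fun x => x) = some mx)
    (hne : c.getD mx PySem.Set.empty ≠ [])
    (htla : tla ∉ c.getD mx PySem.Set.empty) :
    absRec (c.insert mx (PySem.Set.add (c.getD mx PySem.Set.empty) tla))
      = (mx, ((c.getD mx PySem.Set.empty).length : Int) + 1,
          (c.getD mx PySem.Set.empty).headD "") := by
  obtain ⟨hmem, hub⟩ := (max?_id_iff _ _).mp hmax
  have hct : c.contains mx = true := (PySem.Dict.contains_iff_mem_keys c mx).mpr hmem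
  have hk : (c.insert mx (PySem.Set.add (c.getD mx PySem.Set.empty) tla)).keys = c.keys :=
    PySem.Dict.keys_insert_of_contains c _ hct
  unfold absRec
  rw [hk, hmax]
  dsimp only
  rw [PySem.Dict.getD_insert_self, set_add_of_not_mem _ _ htla]
  rw [headD_append_of_ne_nil _ _ _ hne]
  simp

theorem absRec_lt (c : PySem.Dict Int (PySem.Set String)) (mx val : Int) (s : PySem.Set String)
    (hmax : PySem.List.max? c.keys (fun x => x) = some mx) (hv : val < mx) :
    absRec (c.insert val s) = absRec c := by
  obtain ⟨hmem, hub⟩ := (max?_id_iff _ _).mp hmax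
  have hgd : ∀ d0, (c.insert val s).getD mx d0 = c.getD mx d0 :=
    fun d0 => PySem.Dict.getD_insert_of_ne c s d0 (by omega)
  have hmax' : PySem.List.max? ((c.insert val s).keys) (fun x => x) = some mx := by
    by_cases hcv : c.contains val = true
    · rw [PySem.Dict.keys_insert_of_contains c s hcv]
      exact hmax
    · rw [PySem.Dict.keys_insert_of_not_contains c s (by simpa using hcv), max?_id_iff]
      refine ⟨List.mem_append.mpr (Or.inl hmem), ?_⟩
      intro y hy
      rcases List.mem_append.mp hy with h | h
      · exact hub y h
      · simp at h; omega
  unfold absRec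
  rw [hmax', hmax]
  dsimp only
  rw [hgd]

theorem rel_new {tm : PySem.Dict String (PySem.Dict Int (PySem.Set String))}
    {b : PySem.Dict String (Int × Int × String)} {z : String}
    (hR : RelTB tm b) (hcf : tm.contains z = false)
    (C : PySem.Dict Int (PySem.Set String)) (w : Int × Int × String) (habs : absRec C = w) :
    RelTB (tm.insert z C) (b.insert z w) := by
  have hbf : b.contains z = false := by rw [contains_rel hR]; exact hcf
  unfold RelTB at hR ⊢
  rw [PySem.Dict.items_insert_of_not_contains b w hbf,
      PySem.Dict.items_insert_of_not_contains tm C hcf, List.map_append, hR]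
  simp [habs]

theorem step_sim (tla : String) (tm : PySem.Dict String (PySem.Dict Int (PySem.Set String)))
    (b : PySem.Dict String (Int × Int × String)) (zv : String × Int)
    (hR : RelTB tm b) (hWf : WfTM tm) (hF : FreshAt tm tla zv.1) :
    RelTB (stepA tla tm zv) (stepB tla b zv) := by
  obtain ⟨hnd, hin⟩ := hWf
  obtain ⟨z, val⟩ := zv
  simp only at hF
  unfold stepA stepB
  dsimp only
  by_cases hpos : val > 0
  case neg => rw [if_neg hpos, if_neg hpos]; exact hR
  rw [if_pos hpos, if_pos hpos]
  simp only [PySem.Dict.modify]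
  by_cases hc : tm.contains z = true
  case neg =>
    have hcf : tm.contains z = false := by simpa using hc
    have hbg : b.get? z = none := by
      rw [PySem.Dict.get?_eq_none_iff_contains, contains_rel hR]; exact hcf
    rw [hbg]
    rw [PySem.Dict.getD_of_not_contains tm _ hcf]
    apply rel_new hR hcf
    have h1 : PySem.Set.add ((PySem.Dict.empty : PySem.Dict Int (PySem.Set String)).getD val PySem.Set.empty) tla = [tla] := rfl
    rw [h1]
    simpa using absRec_new val [tla]
  · obtain ⟨c, hg, hgd⟩ := get?_of_contains tm z hc
    rw [get?_rel hR hnd hg]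
    have hcWf := hin (z, c) ((PySem.Dict.get?_eq_some_iff_mem_items tm z c hnd).mp hg)
    have hkne : c.keys ≠ [] := by
      intro h
      simp only [PySem.Dict.keys] at h
      exact hcWf.2.1 (List.map_eq_nil_iff.mp h)
    obtain ⟨mx, hmax⟩ : ∃ mx, PySem.List.max? c.keys (fun x => x) = some mx := by
      cases hm : PySem.List.max? c.keys (fun x => x) with
      | none => exact absurd ((PySem.List.max?_eq_none_iff _ _).mp hm) hkne
      | some m => exact ⟨m, rfl⟩
    have habs : absRec c = (mx, ((c.getD mx PySem.Set.empty).length : Int),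
        (c.getD mx PySem.Set.empty).headD "") := by
      unfold absRec
      rw [hmax]
      rfl
    rw [habs]
    dsimp only
    rcases lt_trichotomy mx val with hv | hv | hv
    · rw [if_pos hv]
      rw [hgd]
      apply rel_insert hR hnd hg
      have hnc : c.contains val = false := by
        rw [← Bool.not_eq_true, PySem.Dict.contains_iff_mem_keys]
        intro h
        exact absurd ((max?_id_iff _ _).mp hmax |>.2 val h) (by omega)
      rw [PySem.Dict.getD_of_not_contains c _ hnc]
      have h1 : PySem.Set.add (PySem.Set.empty : PySem.Set String) tla = [tla] := rfl
      rw [h1]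
      simpa using absRec_gt c mx val [tla] hmax hv
    · subst hv
      rw [if_neg (lt_irrefl mx), if_pos rfl]
      rw [hgd]
      apply rel_insert hR hnd hg
      have hcv : c.contains mx = true :=
        (PySem.Dict.contains_iff_mem_keys c mx).mpr ((max?_id_iff _ _).mp hmax).1
      obtain ⟨s, hgs, hgds⟩ := get?_of_contains c mx hcv
      have hne : c.getD mx PySem.Set.empty ≠ [] := by
        rw [hgds]
        exact hcWf.2.2 (mx, s) (PySem.Dict.mem_items_of_get?_eq_some c hgs)
      have htla : tla ∉ c.getD mx PySem.Set.empty := by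
        have := hF mx
        rw [hgd] at this
        exact this
      exact absRec_eq_add c mx tla hmax hne htla
    · rw [if_neg (by omega), if_neg (by omega)]
      rw [hgd]
      exact rel_untouched hR hnd hg _ (absRec_lt c mx val _ hmax hv)

theorem inner_sim (tla : String) (zvs : List (String × Int))
    (tm : PySem.Dict String (PySem.Dict Int (PySem.Set String)))
    (b : PySem.Dict String (Int × Int × String)) (S : List String)
    (hnd : (zvs.map (·.1)).Nodup) (hR : RelTB tm b) (hWf : WfTM tm)
    (hT : TeamsIn tm S) (hS : tla ∈ S)
    (hF : ∀ z ∈ zvs.map (·.1), FreshAt tm tla z) :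
    RelTB (zvs.foldl (stepA tla) tm) (zvs.foldl (stepB tla) b) ∧
      WfTM (zvs.foldl (stepA tla) tm) ∧ TeamsIn (zvs.foldl (stepA tla) tm) S := by
  induction zvs generalizing tm b with
  | nil => exact ⟨hR, hWf, hT⟩
  | cons zv rest ih =>
    simp only [List.map_cons, List.nodup_cons] at hnd
    simp only [List.foldl_cons]
    apply ih
    · exact hnd.2
    · exact step_sim tla tm b zv hR hWf (hF zv.1 (by simp))
    · exact step_wf tla tm zv hWf
    · exact step_teams tla tm zv S hWf.1 hT hS
    · intro z hz
      refine step_fresh tla tla z tm zv ?_ (hF z (by simp [hz]))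
      intro hzz
      rw [hzz] at hz
      exact hnd.1 hz

theorem outer_sim (items : List (String × PySem.Dict String Int))
    (tm : PySem.Dict String (PySem.Dict Int (PySem.Set String)))
    (b : PySem.Dict String (Int × Int × String)) (S : List String)
    (hnd : (items.map (·.1)).Nodup) (hdisj : ∀ k ∈ items.map (·.1), k ∉ S)
    (hinner : ∀ p ∈ items, p.2.keys.Nodup)
    (hR : RelTB tm b) (hWf : WfTM tm) (hT : TeamsIn tm S) :
    RelTB (items.foldl (fun tm tz => tz.2.items.foldl (stepA tz.1) tm) tm)
      (items.foldl (fun b tz => tz.2.items.foldl (stepB tz.1) b) b) ∧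
      WfTM (items.foldl (fun tm tz => tz.2.items.foldl (stepA tz.1) tm) tm) := by
  induction items generalizing tm b S with
  | nil => exact ⟨hR, hWf⟩
  | cons tz rest ih =>
    simp only [List.map_cons, List.nodup_cons] at hnd
    simp only [List.foldl_cons]
    have hT' : TeamsIn tm (tz.1 :: S) := fun p hp q hq t ht => List.mem_cons_of_mem _ (hT p hp q hq t ht)
    have hFr : ∀ z ∈ (tz.2.items.map (·.1)), FreshAt tm tz.1 z := by
      intro z _
      exact teams_fresh tm S tz.1 hWf.1 hT (hdisj tz.1 (by simp)) z
    have hnd_in : (tz.2.items.map (·.1)).Nodup := by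
      have := hinner tz (by simp)
      simpa [PySem.Dict.keys] using this
    obtain ⟨hR', hWf', hT''⟩ := inner_sim tz.1 tz.2.items tm b (tz.1 :: S) hnd_in hR hWf hT'
      (by simp) hFr
    exact ih _ _ (tz.1 :: S) hnd.2
      (fun k hk => by
        simp only [List.mem_cons]
        push Not
        exact ⟨fun he => hnd.1 (he ▸ hk), hdisj k (by simp [hk])⟩)
      (fun p hp => hinner p (by simp [hp])) hR' hWf' hT''

def pickOwner (zc : String × PySem.Dict Int (PySem.Set String)) : Option (String × String) :=
  match PySem.List.max? zc.2.keys (fun x => x) with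
  | none => none
  | some mx =>
    if (zc.2.getD mx PySem.Set.empty).length = 1 then
      some (zc.1, (zc.2.getD mx PySem.Set.empty).headD "")
    else none

theorem owners_items (l : List (String × PySem.Dict Int (PySem.Set String)))
    (ow : PySem.Dict String String) (hnd : (l.map (·.1)).Nodup)
    (hdisj : ∀ k ∈ l.map (·.1), ow.contains k = false) :
    (l.foldl
      (fun ow zc =>
        match PySem.List.max? zc.2.keys (fun x => x) with
        | none => ow
        | some mx =>
          let top := zc.2.getD mx PySem.Set.empty
          if top.length = 1 then ow.insert zc.1 (top.headD "") else ow) ow).items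
      = ow.items ++ l.filterMap pickOwner := by
  induction l generalizing ow with
  | nil => simp
  | cons zc rest ih =>
    simp only [List.map_cons, List.nodup_cons] at hnd
    simp only [List.foldl_cons, List.filterMap_cons]
    cases hm : PySem.List.max? zc.2.keys (fun x => x) with
    | none =>
      rw [show pickOwner zc = none by unfold pickOwner; rw [hm]]
      exact ih ow hnd.2 (fun k hk => hdisj k (by simp [hk]))
    | some mx =>
      dsimp only
      by_cases hlen : (zc.2.getD mx PySem.Set.empty).length = 1
      · rw [show pickOwner zc = some (zc.1, (zc.2.getD mx PySem.Set.empty).headD "") by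
          unfold pickOwner; rw [hm]; dsimp only; rw [if_pos hlen]]
        rw [if_pos hlen]
        have hcf : ow.contains zc.1 = false := hdisj zc.1 (by simp)
        rw [ih (ow.insert zc.1 ((zc.2.getD mx PySem.Set.empty).headD "")) hnd.2 ?_]
        · rw [PySem.Dict.items_insert_of_not_contains ow _ hcf]
          simp
        · intro k hk
          rw [PySem.Dict.contains_insert]
          have hk1 : k ≠ zc.1 := fun he => hnd.1 (he ▸ hk)
          simp [hk1, hdisj k (by simp [hk])]
      · rw [show pickOwner zc = none by
          unfold pickOwner; rw [hm]; dsimp only; rw [if_neg hlen]]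
        rw [if_neg hlen]
        exact ih ow hnd.2 (fun k hk => hdisj k (by simp [hk]))

theorem values_foldl_insert {κ ν : Type} [BEq κ] [LawfulBEq κ] (P : ν → Prop) (l : List (κ × ν))
    (d : PySem.Dict κ ν) (hd : ∀ w ∈ d.values, P w) (hl : ∀ x ∈ l, P x.2) :
    ∀ w ∈ (l.foldl (fun d p => d.insert p.1 p.2) d).values, P w := by
  induction l generalizing d with
  | nil => exact hd
  | cons p rest ih =>
    simp only [List.foldl_cons]
    apply ih
    · intro w hw
      rcases PySem.Dict.mem_values_insert d p.1 p.2 w hw with rfl | hw'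
      · exact hl p (by simp)
      · exact hd w hw'
    · exact fun x hx => hl x (by simp [hx])

theorem main_eq (zone_map : List (String × List (String × Int))) :
    tidy_zones zone_map = tidy_zones_alt zone_map := by
  unfold tidy_zones tidy_zones_alt
  dsimp only
  set zm : PySem.Dict String (PySem.Dict String Int) :=
    PySem.Dict.ofList (zone_map.map (fun p => (p.1, PySem.Dict.ofList p.2))) with hzm
  rw [PySem.List.foldl_prod_mk
    (fun tm (tz : String × PySem.Dict String Int) => List.foldl (stepA tz.1) tm tz.2.items)
    (fun td (tz : String × PySem.Dict String Int) => td.insert tz.1 PySem.Set.empty)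
    zm.items PySem.Dict.empty PySem.Dict.empty]
  dsimp only
  set A := zm.items.foldl (fun tm tz => tz.2.items.foldl (stepA tz.1) tm) PySem.Dict.empty with hA
  set B := zm.items.foldl (fun b tz => tz.2.items.foldl (stepB tz.1) b) PySem.Dict.empty with hB
  set T0 := zm.items.foldl (fun td tz => td.insert tz.1 PySem.Set.empty) PySem.Dict.empty with hT0
  have hknd : zm.keys.Nodup := PySem.Dict.nodup_keys_ofList _
  have hindnd : (zm.items.map (·.1)).Nodup := by
    simpa [PySem.Dict.keys] using hknd
  have hinner : ∀ p ∈ zm.items, p.2.keys.Nodup := by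
    intro p hp
    have hv : p.2 ∈ zm.values := by
      simp only [PySem.Dict.values]
      exact List.mem_map.mpr ⟨p, hp, rfl⟩
    have h1 : ∀ w ∈ (PySem.Dict.empty : PySem.Dict String (PySem.Dict String Int)).values,
        w.keys.Nodup := by
      intro w hw
      simp [PySem.Dict.values, PySem.Dict.empty] at hw
    have h2 : ∀ x ∈ zone_map.map (fun q => (q.1, PySem.Dict.ofList q.2)), x.2.keys.Nodup := by
      intro x hx
      obtain ⟨q, _, rfl⟩ := List.mem_map.mp hx
      exact PySem.Dict.nodup_keys_ofList q.2
    have hv' : p.2 ∈ ((zone_map.map (fun q => (q.1, PySem.Dict.ofList q.2))).foldl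
        (fun d p => d.insert p.1 p.2)
        (PySem.Dict.empty : PySem.Dict String (PySem.Dict String Int))).values := hv
    exact values_foldl_insert (fun w : PySem.Dict String Int => w.keys.Nodup)
      (zone_map.map (fun q => (q.1, PySem.Dict.ofList q.2)))
      (PySem.Dict.empty : PySem.Dict String (PySem.Dict String Int)) h1 h2 p.2 hv'
  have hWfE : WfTM PySem.Dict.empty := by
    refine ⟨PySem.Dict.nodup_keys_empty, ?_⟩
    intro p hp
    simp [PySem.Dict.empty] at hp
  have hTE : TeamsIn PySem.Dict.empty [] := by
    intro p hp
    simp [PySem.Dict.empty] at hp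
  obtain ⟨hRel, hWfA⟩ := outer_sim zm.items PySem.Dict.empty PySem.Dict.empty []
    hindnd (by simp) hinner rfl hWfE hTE
  rw [← hA, ← hB] at hRel
  rw [← hA] at hWfA
  have hAnd : (A.items.map (·.1)).Nodup := by
    simpa [PySem.Dict.keys] using hWfA.1
  have hOwn := owners_items A.items PySem.Dict.empty hAnd (fun k _ => PySem.Dict.contains_empty k)
  unfold RelTB at hRel
  have hB' : B.items.foldl
      (fun td zr =>
        if zr.2.2.1 = 1 then td.modify zr.2.2.2 PySem.Set.empty (fun s => PySem.Set.add s zr.1) else td)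
      T0
      = A.items.foldl
        (fun td zc =>
          match pickOwner zc with
          | some y => td.modify y.2 PySem.Set.empty (fun s => PySem.Set.add s y.1)
          | none => td) T0 := by
    rw [hRel, List.foldl_map]
    apply PySem.List.foldl_congr_mem
    intro acc zc _
    unfold pickOwner absRec
    cases hm : PySem.List.max? zc.2.keys (fun x => x) with
    | none => simp
    | some mx =>
      dsimp only
      by_cases hlen : (zc.2.getD mx PySem.Set.empty).length = 1
      · rw [if_pos hlen, if_pos (show ((zc.2.getD mx ([] : PySem.Set String)).length : Int) = 1 by exact_mod_cast hlen)]
        rfl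
      · rw [if_neg hlen, if_neg (show ¬ ((zc.2.getD mx ([] : PySem.Set String)).length : Int) = 1 by exact_mod_cast hlen)]
  have hA' : ((A.items.foldl
      (fun ow zc =>
        match PySem.List.max? zc.2.keys (fun x => x) with
        | none => ow
        | some mx =>
          let top := zc.2.getD mx PySem.Set.empty
          if top.length = 1 then ow.insert zc.1 (top.headD "") else ow)
      PySem.Dict.empty).items.foldl
        (fun td so => td.modify so.2 PySem.Set.empty (fun s => PySem.Set.add s so.1)) T0)
      = A.items.foldl
        (fun td zc =>
          match pickOwner zc with
          | some y => td.modify y.2 PySem.Set.empty (fun s => PySem.Set.add s y.1)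
          | none => td) T0 := by
    rw [hOwn]
    rw [show (PySem.Dict.empty : PySem.Dict String String).items = [] from rfl, List.nil_append]
    rw [List.foldl_filterMap]
    apply PySem.List.foldl_congr_mem
    intro acc x _
    cases pickOwner x <;> rfl
  rw [hA', hB']

-- ===== VERDICT (by name: the statement is the Claim_ definition above) =====
theorem tidy_zones_spec : Claim_equal_tidy_zones := by
  intro zone_map _
  unfold Spec_tidy_zones
  exact main_eq zone_map
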